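-- pv_equiv track=rewrite | github.com/ksv1986/musiclinter | musiclinter/tag.py | guess_tracknumber
-- ===== SOURCE A (Python) =====
-- def guess_tracknumber(name: str) -> str:
--     for i in range(len(name)):
--         if name[i].isdigit():
--             name = name[i:]
--             break
--     else:
--         return ""
--     if len(name) == 1 or not name[1].isdigit():
--         return name[0:1]
--     if len(name) == 2 or not name[2].isdigit():
--         return name[0:2]
--     return ""
-- ===== SOURCE B (Python) =====
-- def guess_tracknumber(name: str) -> str:
--     # find index of first digit; None if there is no digit
--     i = next((i for i, c in enumerate(name) if c.isdigit()), None)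
--     if i is None:
--         return ""
--     # maximal run of consecutive digits starting there
--     run = ""
--     for c in name[i:]:
--         if not c.isdigit():
--             break
--         run += c
--     return run if len(run) <= 2 else ""
-- ===== Notes on version B (the rewrite author's own statement) =====
-- stated objective: simpler
-- what changed: Replaces A's index-loop with in-place reassignment plus bounded lookahead conditionals by a clean extract-then-classify decomposition: find the first digit index, take the maximal digit run from there, return it iff its length is at most 2.
import Mathlib
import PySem

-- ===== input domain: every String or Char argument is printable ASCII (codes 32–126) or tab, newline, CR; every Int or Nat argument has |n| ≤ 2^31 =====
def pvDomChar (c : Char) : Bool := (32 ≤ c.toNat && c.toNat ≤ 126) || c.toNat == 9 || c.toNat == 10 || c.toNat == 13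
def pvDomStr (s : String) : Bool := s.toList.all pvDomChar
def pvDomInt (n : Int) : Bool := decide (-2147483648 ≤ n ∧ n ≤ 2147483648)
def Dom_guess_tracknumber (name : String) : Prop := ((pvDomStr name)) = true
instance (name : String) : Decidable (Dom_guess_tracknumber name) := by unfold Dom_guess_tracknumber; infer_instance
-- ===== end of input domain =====

-- B replaces A's break-out index loop with reassignment and chained bounded-lookahead
-- conditionals by a simpler extract-then-classify decomposition (first digit index,
-- maximal digit run, classify by length); same behaviour and cost.


-- ===== PORT A =====
-- the 'for i in range(len(name)): if name[i].isdigit(): name = name[i:]; break / else: return ""' loop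
def pvA_loop (name : List Char) (i : Nat) : Option (List Char) :=
  if h : i < name.length then
    if PySem.Chars.isdigit name[i] then some (PySem.List.slice name (some (i : Int)) none)
    else pvA_loop name (i + 1)
  else none
termination_by name.length - i

-- the tail of A after the break: chained length / lookahead tests on the reassigned name
def pvA_tail (name : List Char) : List Char :=
  if name.length == 1 || !PySem.Chars.isdigit (name.getD 1 ' ') then
    PySem.List.slice name (some 0) (some 1)
  else if name.length == 2 || !PySem.Chars.isdigit (name.getD 2 ' ') then
    PySem.List.slice name (some 0) (some 2)
  else []

def guess_tracknumber (name : String) : String :=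
  match pvA_loop name.toList 0 with
  | none => ""
  | some t => String.ofList (pvA_tail t)

-- ===== PORT B =====
def guess_tracknumber_alt (name : String) : String :=
  match name.toList.findIdx? PySem.Chars.isdigit with
  | none => ""
  | some i =>
    let run := (name.toList.drop i).takeWhile PySem.Chars.isdigit
    if run.length ≤ 2 then String.ofList run else ""

-- ===== PRECONDITION & SPEC =====
def Spec_guess_tracknumber (name : String) (out : String) : Prop := out = guess_tracknumber_alt name
instance (name : String) (out : String) : Decidable (Spec_guess_tracknumber name out) := by unfold Spec_guess_tracknumber; infer_instance

-- ===== CLAIM (what is proved, stated in full; the proofs are below) =====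
def Claim_equal_guess_tracknumber : Prop := ∀ (name : String), Dom_guess_tracknumber name → Spec_guess_tracknumber name (guess_tracknumber name)

-- ===== LEMMAS AND PROOFS =====

-- Phase 1: A's scanning loop finds the first digit index, i.e. findIdx?
theorem pvA_loop_eq (name : List Char) (k : Nat) :
    pvA_loop name k = ((name.drop k).findIdx? PySem.Chars.isdigit).map (fun j => name.drop (k + j)) := by
  by_cases h : k < name.length
  · rw [pvA_loop]
    simp only [h, dif_pos]
    rw [List.drop_eq_getElem_cons h]
    rw [List.findIdx?_cons]
    by_cases hd : PySem.Chars.isdigit name[k]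
    · simp [hd, PySem.List.slice_from_natCast]
    · simp only [hd, Bool.false_eq_true, reduceIte]
      rw [pvA_loop_eq name (k + 1)]
      cases hfi : (name.drop (k + 1)).findIdx? PySem.Chars.isdigit with
      | none => simp
      | some j =>
        simp only [Option.map_some]
        have : k + 1 + j = k + (j + 1) := by omega
        rw [this]
  · rw [pvA_loop]
    simp only [h, dif_neg, not_false_iff]
    rw [List.drop_eq_nil_of_le (by omega)]
    simp
termination_by name.length - k

-- Phase 2: A's chained tests compute the (≤ 2)-classified maximal digit run
theorem pvA_tail_eq (t : List Char) (ht : t ≠ []) (hd : PySem.Chars.isdigit (t.headI) = true) :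
    pvA_tail t =
      (if (t.takeWhile PySem.Chars.isdigit).length ≤ 2 then t.takeWhile PySem.Chars.isdigit else []) := by
  match t with
  | [] => exact absurd rfl ht
  | a :: rest =>
    simp only [List.headI] at hd
    match rest with
    | [] => simp [pvA_tail, PySem.List.slice, List.takeWhile, hd]
    | b :: rest2 =>
      by_cases hb : PySem.Chars.isdigit b
      · match rest2 with
        | [] => simp [pvA_tail, PySem.List.slice, List.takeWhile, hd, hb]
        | c :: rest3 =>
          by_cases hc : PySem.Chars.isdigit c
          · have h3 : ¬ ((a :: b :: c :: rest3).takeWhile PySem.Chars.isdigit).length ≤ 2 := by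
              simp [List.takeWhile, hd, hb, hc]
            simp [pvA_tail, List.takeWhile, hd, hb, hc]
          · simp [pvA_tail, PySem.List.slice, List.takeWhile, hd, hb, hc]
      · simp [pvA_tail, PySem.List.slice, List.takeWhile, hd, hb]

-- ===== VERDICT (by name: the statement is the Claim_ definition above) =====
theorem guess_tracknumber_spec : Claim_equal_guess_tracknumber := by
  intro name _
  unfold Spec_guess_tracknumber guess_tracknumber guess_tracknumber_alt
  rw [pvA_loop_eq]
  simp only [List.drop_zero]
  cases hfi : name.toList.findIdx? PySem.Chars.isdigit with
  | none => simp
  | some i =>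
    simp only [Option.map_some, Nat.zero_add]
    obtain ⟨hi, hp, -⟩ := List.findIdx?_eq_some_iff_getElem.mp hfi
    have hne : name.toList.drop i ≠ [] := by
      intro h
      have := List.drop_eq_nil_iff.mp h
      omega
    have hhd : PySem.Chars.isdigit ((name.toList.drop i).headI) = true := by
      rw [List.drop_eq_getElem_cons hi, List.headI_cons]
      exact hp
    rw [pvA_tail_eq _ hne hhd]
    split_ifs <;> rfl
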